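-- pv_equiv track=rewrite | github.com/Sumanth-Katnam/leet-code-py | Interview Questions OLD/subscorePower.py | optimalScoresOfSubArrays
-- ===== SOURCE A (Python) =====
-- def optimalScoresOfSubArrays(arr):
--     prefixSums = []
--     positionElementProdSums = []
--     positionElementProdSumsReverse = []
--     runningSum = 0
--     posElementProdSum = 0
--     n = len(arr)
--     for i in range(n):
--         runningSum += arr[i]
--         posElementProdSum += (i+1) * arr[i]
--         prefixSums.append(runningSum)
--         positionElementProdSums.append(posElementProdSum)
--     posElementProdSum = 0
--     for i in range(n-1,-1,-1):
--         posElementProdSum += (n-i) * arr[i]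
--         positionElementProdSumsReverse.append(posElementProdSum)
--
--     sum = lambda sums, l, r: sums[r] - (sums[l-1] if l-1>=0 else 0) if l <= r else 0
--     totalScore = 0
--     stack = []
--     for i in range(n):
--         while stack and arr[stack[-1][0]] > arr[i]:
--             minElementIndex, leftIndex = stack.pop()
--             rightIndex = i
--             rightCount = rightIndex - minElementIndex
--             leftCount = minElementIndex - leftIndex
--             minElement = arr[minElementIndex]
--             shiftedPosEleProdSum = sum(positionElementProdSums, leftIndex + 1, minElementIndex) - sum(prefixSums, leftIndex  + 1, minElementIndex) * (leftIndex  + 1)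
--             currRangeScore = rightCount * minElement * shiftedPosEleProdSum
--             totalScore += currRangeScore
--             shiftedPosEleProdSum = sum(positionElementProdSumsReverse, n-rightIndex, n-minElementIndex-2) - sum(prefixSums, minElementIndex+1, rightIndex-1)*(n-rightIndex)
--             currRangeScore = leftCount * minElement * shiftedPosEleProdSum
--             totalScore += currRangeScore
--         if not stack: stack.append((i, -1))
--         else: stack.append((i, stack[-1][0]))
--     while stack:
--         minElementIndex, leftIndex = stack.pop()
--         rightIndex = n
--         rightCount = rightIndex - minElementIndex
--         leftCount = minElementIndex - leftIndex
--         minElement = arr[minElementIndex]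
--         shiftedPosEleProdSum = sum(positionElementProdSums, leftIndex + 1, minElementIndex) - sum(prefixSums, leftIndex  + 1, minElementIndex) * (leftIndex  + 1)
--         currRangeScore = rightCount * minElement * shiftedPosEleProdSum
--         totalScore += currRangeScore
--         shiftedPosEleProdSum = sum(positionElementProdSumsReverse, n-rightIndex, n-minElementIndex-2) - sum(prefixSums, minElementIndex+1, rightIndex-1)*(n-rightIndex)
--         currRangeScore = leftCount * minElement * shiftedPosEleProdSum
--         totalScore += currRangeScore
--     return totalScore
-- ===== SOURCE B (Python) =====
-- def optimalScoresOfSubArrays(arr):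
--     total = 0
--     n = len(arr)
--     for l in range(n):
--         s = 0
--         mn = arr[l]
--         for r in range(l, n):
--             s += arr[r]
--             mn = min(mn, arr[r])
--             total += mn * s
--     return total
-- ===== Notes on version B (the rewrite author's own statement) =====
-- stated objective: simpler
-- what changed: Replaced A's prefix-sums + position-weighted-sums + monotonic-stack decomposition by a direct O(n^2) double loop that, for each left index, keeps a running sum and running minimum and accumulates min*sum for every subarray.
import Mathlib
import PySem

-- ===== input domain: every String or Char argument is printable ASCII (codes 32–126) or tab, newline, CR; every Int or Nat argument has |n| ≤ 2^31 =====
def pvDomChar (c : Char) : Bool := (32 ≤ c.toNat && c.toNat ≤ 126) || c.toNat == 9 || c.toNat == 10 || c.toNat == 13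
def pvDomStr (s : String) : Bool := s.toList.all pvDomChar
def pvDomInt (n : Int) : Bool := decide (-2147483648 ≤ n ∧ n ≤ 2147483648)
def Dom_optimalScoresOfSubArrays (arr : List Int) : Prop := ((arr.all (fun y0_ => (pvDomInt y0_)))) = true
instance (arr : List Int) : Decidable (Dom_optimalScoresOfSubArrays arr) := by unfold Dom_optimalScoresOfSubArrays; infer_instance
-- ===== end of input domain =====

-- B replaces A's prefix-sums + monotonic-stack O(n) scheme by a direct O(n^2) double loop
-- (running sum and running minimum per left index); same return value, proved equal below.

-- ===== PORT A =====
def pvSubSum (sums : List Int) (l r : Int) : Int :=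
  if l ≤ r then PySem.List.pyGetD sums r 0 - (if l - 1 ≥ 0 then PySem.List.pyGetD sums (l - 1) 0 else 0) else 0

def pvPopContrib (arr prefixSums posProd posProdRev : List Int) (n m left right : Int) : Int :=
  let rightCount := right - m
  let leftCount := m - left
  let minElement := PySem.List.pyGetD arr m 0
  let s1 := pvSubSum posProd (left + 1) m - pvSubSum prefixSums (left + 1) m * (left + 1)
  let c1 := rightCount * minElement * s1
  let s2 := pvSubSum posProdRev (n - right) (n - m - 2) - pvSubSum prefixSums (m + 1) (right - 1) * (n - right)
  let c2 := leftCount * minElement * s2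
  c1 + c2

def pvInnerLoop (arr prefixSums posProd posProdRev : List Int) (n i : Int) :
    List (Int × Int) → Int → List (Int × Int) × Int
  | [], total => ([], total)
  | (m, left) :: rest, total =>
      if PySem.List.pyGetD arr m 0 > PySem.List.pyGetD arr i 0 then
        pvInnerLoop arr prefixSums posProd posProdRev n i rest
          (total + pvPopContrib arr prefixSums posProd posProdRev n m left i)
      else ((m, left) :: rest, total)

def pvFinalLoop (arr prefixSums posProd posProdRev : List Int) (n : Int) :
    List (Int × Int) → Int → Int
  | [], total => total
  | (m, left) :: rest, total =>
      pvFinalLoop arr prefixSums posProd posProdRev n rest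
        (total + pvPopContrib arr prefixSums posProd posProdRev n m left n)

def optimalScoresOfSubArrays (arr : List Int) : Int :=
  let n : Int := arr.length
  let st1 := (PySem.List.pyRange 0 n 1).foldl
    (fun (st : Int × Int × List Int × List Int) i =>
      let runningSum := st.1 + PySem.List.pyGetD arr i 0
      let posElementProdSum := st.2.1 + (i + 1) * PySem.List.pyGetD arr i 0
      (runningSum, posElementProdSum, st.2.2.1 ++ [runningSum], st.2.2.2 ++ [posElementProdSum]))
    (0, 0, [], [])
  let prefixSums := st1.2.2.1
  let posProd := st1.2.2.2
  let st2 := (PySem.List.pyRange (n - 1) (-1) (-1)).foldl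
    (fun (st : Int × List Int) i =>
      let p := st.1 + (n - i) * PySem.List.pyGetD arr i 0
      (p, st.2 ++ [p]))
    (0, [])
  let posProdRev := st2.2
  let st3 := (PySem.List.pyRange 0 n 1).foldl
    (fun (st : List (Int × Int) × Int) i =>
      let st' := pvInnerLoop arr prefixSums posProd posProdRev n i st.1 st.2
      match st'.1 with
      | [] => ((i, -1) :: st'.1, st'.2)
      | (m, _) :: _ => ((i, m) :: st'.1, st'.2))
    ([], 0)
  pvFinalLoop arr prefixSums posProd posProdRev n st3.1 st3.2

-- ===== PORT B =====
def optimalScoresOfSubArrays_alt (arr : List Int) : Int :=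
  let n : Int := arr.length
  (PySem.List.pyRange 0 n 1).foldl
    (fun total l =>
      ((PySem.List.pyRange l n 1).foldl
        (fun (st : Int × Int × Int) r =>
          let s := st.1 + PySem.List.pyGetD arr r 0
          let mn := min st.2.1 (PySem.List.pyGetD arr r 0)
          (s, mn, st.2.2 + mn * s))
        (0, PySem.List.pyGetD arr l 0, total)).2.2)
    0

-- ===== PRECONDITION & SPEC =====
def Spec_optimalScoresOfSubArrays (arr : List Int) (out : Int) : Prop := out = optimalScoresOfSubArrays_alt arr
instance (arr : List Int) (out : Int) : Decidable (Spec_optimalScoresOfSubArrays arr out) := by unfold Spec_optimalScoresOfSubArrays; infer_instance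

-- ===== CLAIM =====
def Claim_equal_optimalScoresOfSubArrays : Prop := ∀ (arr : List Int), Dom_optimalScoresOfSubArrays arr → Spec_optimalScoresOfSubArrays arr (optimalScoresOfSubArrays arr)

-- ===== LEMMAS AND PROOFS =====

-- element / prefix-sum abstractions
def pvA (arr : List Int) (j : Nat) : Int := arr.getD j 0
def pvS (arr : List Int) (k : Nat) : Int := (arr.take k).sum
def pvW (arr : List Int) (k : Nat) : Int := ((List.range k).map (fun (j : Nat) => ((j : Int) + 1) * pvA arr j)).sum
def pvWrev (arr : List Int) (k : Nat) : Int :=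
  ((List.range k).map (fun (t : Nat) => ((t : Int) + 1) * pvA arr (arr.length - 1 - t))).sum
def pvP (arr : List Int) : List Int := (List.range arr.length).map (fun i => pvS arr (i + 1))
def pvQ (arr : List Int) : List Int := (List.range arr.length).map (fun i => pvW arr (i + 1))
def pvR (arr : List Int) : List Int := (List.range arr.length).map (fun k => pvWrev arr (k + 1))
def pvSubN (arr : List Int) (l r : Nat) : Int := pvS arr (r + 1) - pvS arr l
def pvMin (arr : List Int) (l r : Nat) : Int :=
  ((List.range' (l + 1) (r - l)).map (pvA arr)).foldl min (pvA arr l)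

-- nearest previous index with value ≤ (−1 if none)
def pvL (arr : List Int) (t : Nat) : Int :=
  if ∃ j, j < t ∧ pvA arr j ≤ pvA arr t then
    (Nat.findGreatest (fun j => j < t ∧ pvA arr j ≤ pvA arr t) t : Int)
  else -1
def pvLo (arr : List Int) (t : Nat) : Nat := (pvL arr t + 1).toNat

-- nearest following index with strictly smaller value (length if none)
def pvRt (arr : List Int) (t : Nat) : Nat :=
  Nat.find (show ∃ u, t < u ∧ (arr.length ≤ u ∨ pvA arr u < pvA arr t) from
    ⟨arr.length + t + 1, by omega, Or.inl (by omega)⟩)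

def pvPcN (arr : List Int) (t : Nat) : Int :=
  pvPopContrib arr (pvP arr) (pvQ arr) (pvR arr) (arr.length : Int) (t : Int) (pvL arr t) ((pvRt arr t : Nat) : Int)

def pvEnc (arr : List Int) (t : Nat) : Int × Int := ((t : Int), pvL arr t)
def pvAsc (arr : List Int) (i : Nat) : List Nat :=
  (List.range i).filter (fun t => decide (i ≤ pvRt arr t))
def pvStk (arr : List Int) (i : Nat) : List (Int × Int) := ((pvAsc arr i).reverse).map (pvEnc arr)
def pvTot (arr : List Int) (i : Nat) : Int :=
  (((List.range i).filter (fun t => decide (pvRt arr t < i))).map (pvPcN arr)).sum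

-- basic facts ------------------------------------------------------------
theorem pvTakeSum (arr : List Int) (k : Nat) :
    (arr.take (k + 1)).sum = (arr.take k).sum + arr.getD k 0 := by
  induction k generalizing arr with
  | zero => cases arr <;> simp
  | succ k ih => cases arr with
    | nil => simp
    | cons x xs => simp [List.take_succ_cons, ih xs]; ring

theorem pvS_succ (arr : List Int) (k : Nat) : pvS arr (k + 1) = pvS arr k + pvA arr k :=
  pvTakeSum arr k
theorem pvS_eq (arr : List Int) (k : Nat) : pvS arr k = ∑ j ∈ Finset.range k, pvA arr j := by
  induction k with
  | zero => rfl
  | succ k ih => rw [pvS_succ, ih, Finset.sum_range_succ]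
theorem pvW_eq (arr : List Int) (k : Nat) :
    pvW arr k = ∑ j ∈ Finset.range k, ((j : Int) + 1) * pvA arr j := rfl
theorem pvWrev_eq (arr : List Int) (k : Nat) :
    pvWrev arr k = ∑ t ∈ Finset.range k, ((t : Int) + 1) * pvA arr (arr.length - 1 - t) := rfl

theorem pvW_succ (arr : List Int) (k : Nat) :
    pvW arr (k + 1) = pvW arr k + ((k : Int) + 1) * pvA arr k := by
  unfold pvW; rw [List.range_succ]; simp

theorem pvWrev_succ (arr : List Int) (k : Nat) :
    pvWrev arr (k + 1) = pvWrev arr k + ((k : Int) + 1) * pvA arr (arr.length - 1 - k) := by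
  unfold pvWrev; rw [List.range_succ]; simp

-- pvL characterization
theorem pvL_ge (arr : List Int) (t : Nat) : -1 ≤ pvL arr t := by
  unfold pvL; split
  · have := Int.natCast_nonneg (Nat.findGreatest (fun j => j < t ∧ pvA arr j ≤ pvA arr t) t); omega
  · omega
theorem pvL_lt (arr : List Int) (t : Nat) : pvL arr t < (t : Int) := by
  unfold pvL; split
  · next h =>
    obtain ⟨j, hj, hja⟩ := h
    have hspec := Nat.findGreatest_spec (P := fun j => j < t ∧ pvA arr j ≤ pvA arr t)
      (Nat.le_of_lt hj) ⟨hj, hja⟩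
    exact_mod_cast hspec.1
  · have : (0 : Int) ≤ t := Int.natCast_nonneg t
    omega
theorem pvL_spec (arr : List Int) (t : Nat) (h : 0 ≤ pvL arr t) :
    (pvL arr t).toNat < t ∧ pvA arr (pvL arr t).toNat ≤ pvA arr t := by
  unfold pvL at h ⊢
  split at h
  · next hany =>
    obtain ⟨j, hj, hja⟩ := hany
    have hspec := Nat.findGreatest_spec (P := fun j => j < t ∧ pvA arr j ≤ pvA arr t)
      (Nat.le_of_lt hj) ⟨hj, hja⟩
    rw [if_pos ⟨j, hj, hja⟩]
    simpa using hspec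
  · exfalso; omega
theorem pvL_gt (arr : List Int) (t j : Nat) (h1 : pvL arr t < (j : Int)) (h2 : j < t) :
    pvA arr t < pvA arr j := by
  unfold pvL at h1
  by_contra hle
  push_neg at hle
  split at h1
  · next h =>
    have hjn : Nat.findGreatest (fun j => j < t ∧ pvA arr j ≤ pvA arr t) t < j := by exact_mod_cast h1
    exact (Nat.findGreatest_is_greatest hjn (Nat.le_of_lt h2)) ⟨h2, hle⟩
  · next h =>
    exact h ⟨j, h2, hle⟩
theorem pvL_eq_of (arr : List Int) (t kmax : Nat) (h1 : kmax < t) (h2 : pvA arr kmax ≤ pvA arr t)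
    (h3 : ∀ j, kmax < j → j < t → pvA arr t < pvA arr j) : pvL arr t = (kmax : Int) := by
  unfold pvL
  rw [if_pos ⟨kmax, h1, h2⟩]
  norm_cast
  have hle : kmax ≤ Nat.findGreatest (fun j => j < t ∧ pvA arr j ≤ pvA arr t) t :=
    Nat.le_findGreatest (Nat.le_of_lt h1) ⟨h1, h2⟩
  rcases Nat.lt_or_ge kmax (Nat.findGreatest (fun j => j < t ∧ pvA arr j ≤ pvA arr t) t) with hlt | hge
  · exfalso
    have hspec := Nat.findGreatest_spec (P := fun j => j < t ∧ pvA arr j ≤ pvA arr t)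
      (Nat.le_of_lt h1) ⟨h1, h2⟩
    exact absurd hspec.2 (not_le.mpr (h3 _ hlt hspec.1))
  · omega
theorem pvL_eq_neg_one_of (arr : List Int) (t : Nat)
    (h : ∀ j, j < t → pvA arr t < pvA arr j) : pvL arr t = -1 := by
  unfold pvL
  exact if_neg (by rintro ⟨j, hj, hle⟩; exact absurd (h j hj) (not_lt.mpr hle))

-- pvRt characterization
theorem pvRt_gt (arr : List Int) (t : Nat) : t < pvRt arr t :=
  (Nat.find_spec (show ∃ u, t < u ∧ (arr.length ≤ u ∨ pvA arr u < pvA arr t) from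
    ⟨arr.length + t + 1, by omega, Or.inl (by omega)⟩)).1
theorem pvRt_le (arr : List Int) (t : Nat) (h : t < arr.length) : pvRt arr t ≤ arr.length :=
  Nat.find_le ⟨h, Or.inl le_rfl⟩
theorem pvRt_lt_spec (arr : List Int) (t : Nat) (h : pvRt arr t < arr.length) :
    pvA arr (pvRt arr t) < pvA arr t := by
  have hspec := Nat.find_spec (show ∃ u, t < u ∧ (arr.length ≤ u ∨ pvA arr u < pvA arr t) from
    ⟨arr.length + t + 1, by omega, Or.inl (by omega)⟩)
  rcases hspec.2 with hn | hlt
  · exact absurd hn (by unfold pvRt at h; omega)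
  · exact hlt
theorem pvRt_min (arr : List Int) (t u : Nat) (h1 : t < u) (h2 : u < pvRt arr t) :
    u < arr.length ∧ pvA arr t ≤ pvA arr u := by
  have hmin := Nat.find_min (show ∃ u, t < u ∧ (arr.length ≤ u ∨ pvA arr u < pvA arr t) from
    ⟨arr.length + t + 1, by omega, Or.inl (by omega)⟩) (m := u) h2
  push_neg at hmin
  obtain ⟨h3, h4⟩ := hmin h1
  exact ⟨by omega, h4⟩
theorem pvRt_le_of (arr : List Int) (t u : Nat) (h1 : t < u)
    (hu : arr.length ≤ u ∨ pvA arr u < pvA arr t) : pvRt arr t ≤ u :=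
  Nat.find_le ⟨h1, hu⟩
theorem pvRt_ge_of (arr : List Int) (t u : Nat)
    (hmin : ∀ v, t < v → v < u → v < arr.length ∧ ¬ pvA arr v < pvA arr t) : u ≤ pvRt arr t := by
  by_contra hlt
  push_neg at hlt
  have hspec := Nat.find_spec (show ∃ u, t < u ∧ (arr.length ≤ u ∨ pvA arr u < pvA arr t) from
    ⟨arr.length + t + 1, by omega, Or.inl (by omega)⟩)
  have h1 := hspec.1
  obtain ⟨hv1, hv2⟩ := hmin (pvRt arr t) hspec.1 hlt
  rcases hspec.2 with hn | hl
  · unfold pvRt at *; omega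
  · exact hv2 hl

-- build lemmas
theorem pvBuild1 (arr : List Int) :
    ((PySem.List.pyRange 0 (arr.length : Int) 1).foldl
      (fun (st : Int × Int × List Int × List Int) i =>
        let runningSum := st.1 + PySem.List.pyGetD arr i 0
        let posElementProdSum := st.2.1 + (i + 1) * PySem.List.pyGetD arr i 0
        (runningSum, posElementProdSum, st.2.2.1 ++ [runningSum], st.2.2.2 ++ [posElementProdSum]))
      (0, 0, [], []))
    = (pvS arr arr.length, pvW arr arr.length, pvP arr, pvQ arr) := by
  suffices h : ∀ m : Nat,
      ((PySem.List.pyRange 0 (m : Int) 1).foldl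
        (fun (st : Int × Int × List Int × List Int) i =>
          let runningSum := st.1 + PySem.List.pyGetD arr i 0
          let posElementProdSum := st.2.1 + (i + 1) * PySem.List.pyGetD arr i 0
          (runningSum, posElementProdSum, st.2.2.1 ++ [runningSum], st.2.2.2 ++ [posElementProdSum]))
        (0, 0, [], []))
      = (pvS arr m, pvW arr m, (List.range m).map (fun i => pvS arr (i + 1)),
         (List.range m).map (fun i => pvW arr (i + 1))) by
    exact h arr.length
  intro m
  induction m with
  | zero => simp [PySem.List.pyRange_one_eq_nil, pvS, pvW]
  | succ m ih =>
    have hc : ((m : Nat) + 1 : Int) = (m : Int) + 1 := by push_cast; ring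
    rw [show ((m + 1 : Nat) : Int) = (m : Int) + 1 by push_cast; ring,
        PySem.List.pyRange_one_succ_right (by positivity : (0:Int) ≤ (m:Int)), List.foldl_append, ih]
    simp only [List.foldl_cons, List.foldl_nil]
    rw [List.range_succ]
    simp only [List.map_append, List.map_cons, List.map_nil]
    rw [pvS_succ, pvW_succ]
    simp [pvA, PySem.List.pyGetD_natCast]
theorem pvBuild2 (arr : List Int) :
    ((PySem.List.pyRange ((arr.length : Int) - 1) (-1) (-1)).foldl
      (fun (st : Int × List Int) i =>
        let p := st.1 + ((arr.length : Int) - i) * PySem.List.pyGetD arr i 0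
        (p, st.2 ++ [p]))
      (0, []))
    = (pvWrev arr arr.length, pvR arr) := by
  suffices h : ∀ k : Nat, k ≤ arr.length →
      ((PySem.List.pyRange ((k : Int) - 1) (-1) (-1)).foldl
        (fun (st : Int × List Int) i =>
          let p := st.1 + ((arr.length : Int) - i) * PySem.List.pyGetD arr i 0
          (p, st.2 ++ [p]))
        (pvWrev arr (arr.length - k), (List.range (arr.length - k)).map (fun j => pvWrev arr (j + 1))))
      = (pvWrev arr arr.length, (List.range arr.length).map (fun j => pvWrev arr (j + 1))) by
    have h0 := h arr.length le_rfl
    simpa [pvWrev, pvR] using h0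
  intro k
  induction k with
  | zero =>
    intro _
    rw [show ((0 : Nat) : Int) - 1 = -1 by norm_num, PySem.List.pyRange_neg_one_eq_nil le_rfl]
    simp
  | succ k ih =>
    intro hk
    rw [show ((k + 1 : Nat) : Int) - 1 = (k : Int) by push_cast; ring,
        PySem.List.pyRange_neg_one_cons (by omega : (-1 : Int) < (k : Int))]
    simp only [List.foldl_cons]
    have hstate :
        pvWrev arr (arr.length - (k + 1)) + ((arr.length : Int) - (k : Int)) * PySem.List.pyGetD arr (k : Int) 0
          = pvWrev arr (arr.length - k) := by
      have hrec := pvWrev_succ arr (arr.length - (k + 1))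
      have h1 : arr.length - (k + 1) + 1 = arr.length - k := by omega
      have h2 : arr.length - 1 - (arr.length - (k + 1)) = k := by omega
      rw [h1, h2] at hrec
      rw [hrec]
      have h3 : ((arr.length - (k + 1) : Nat) : Int) + 1 = (arr.length : Int) - (k : Int) := by
        push_cast [Nat.cast_sub hk]; ring
      rw [h3]
      simp [pvA, PySem.List.pyGetD_natCast]
    have hlist : (List.range (arr.length - (k + 1))).map (fun j => pvWrev arr (j + 1)) ++
          [pvWrev arr (arr.length - k)]
        = (List.range (arr.length - k)).map (fun j => pvWrev arr (j + 1)) := by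
      have h1 : arr.length - k = (arr.length - (k + 1)) + 1 := by omega
      rw [h1, List.range_succ]
      simp only [List.map_append, List.map_cons, List.map_nil]
    have : (pvWrev arr (arr.length - (k + 1)) + ((arr.length : Int) - (k:Int)) * PySem.List.pyGetD arr (k : Int) 0,
        (List.range (arr.length - (k + 1))).map (fun j => pvWrev arr (j + 1)) ++
          [pvWrev arr (arr.length - (k + 1)) + ((arr.length : Int) - (k:Int)) * PySem.List.pyGetD arr (k : Int) 0])
        = (pvWrev arr (arr.length - k), (List.range (arr.length - k)).map (fun j => pvWrev arr (j + 1))) := by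
      rw [hstate, hlist]
    simp only [this]
    exact ih (by omega)

-- the sum lambda on a built list
theorem pvSubSum_map (f : Nat → Int) (N l r : Nat) (hr : r < N) (hl : l ≤ r) :
    pvSubSum ((List.range N).map f) (l : Int) (r : Int)
      = f r - (if l = 0 then 0 else f (l - 1)) := by
  have hget : ∀ k : Nat, k < N → PySem.List.pyGetD ((List.range N).map f) (k : Int) 0 = f k := by
    intro k hk
    rw [PySem.List.pyGetD_natCast]
    simp [List.getD_eq_getElem?_getD, List.getElem?_map, List.getElem?_range hk]
  unfold pvSubSum
  rw [if_pos (by exact_mod_cast hl)]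
  rw [hget r hr]
  rcases Nat.eq_zero_or_pos l with h0 | hpos
  · subst h0
    norm_num
  · have hc : ((l : Int) - 1) = ((l - 1 : Nat) : Int) := by push_cast [Nat.cast_sub hpos]; ring
    rw [if_pos (by omega : (l : Int) - 1 ≥ 0), hc, hget (l - 1) (by omega), if_neg (by omega)]
theorem pvSubSum_of_gt (sums : List Int) (l r : Int) (h : r < l) : pvSubSum sums l r = 0 := by
  unfold pvSubSum
  rw [if_neg (by omega)]

theorem pvS_diff (arr : List Int) (a b : Nat) (h : a ≤ b) :
    pvS arr b - pvS arr a = ∑ i ∈ Finset.Ico a b, pvA arr i := by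
  rw [pvS_eq, pvS_eq, Finset.range_eq_Ico,
      ← Finset.sum_Ico_consecutive _ (Nat.zero_le a) h]
  ring

-- Abel-style identities
theorem pvAbel1 (arr : List Int) (lo hi : Nat) (h : lo ≤ hi) :
    ∑ l ∈ Finset.Icc lo hi, (pvS arr (hi + 1) - pvS arr l)
      = ∑ j ∈ Finset.Icc lo hi, (((j : Int) - (lo : Int)) + 1) * pvA arr j := by
  induction hi, h using Nat.le_induction with
  | base =>
    simp [pvS_succ, Finset.Icc_self]
  | succ hi hle ih =>
    rw [Finset.sum_Icc_succ_top (by omega : lo ≤ hi + 1),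
        Finset.sum_Icc_succ_top (by omega : lo ≤ hi + 1)]
    have hexp : ∀ l ∈ Finset.Icc lo hi,
        pvS arr (hi + 1 + 1) - pvS arr l = (pvS arr (hi + 1) - pvS arr l) + pvA arr (hi + 1) := by
      intro l _
      rw [pvS_succ]
      ring
    rw [Finset.sum_congr rfl hexp, Finset.sum_add_distrib, ih, Finset.sum_const, Nat.card_Icc]
    have hcard : ((hi + 1 - lo : Nat) : Int) = ((hi : Int) + 1 - lo) := by
      push_cast [Nat.cast_sub (by omega : lo ≤ hi + 1)]; ring
    rw [nsmul_eq_mul, hcard, pvS_succ]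
    push_cast
    ring
theorem pvAbel2 (arr : List Int) (t rt : Nat) (h : t < rt) :
    ∑ r ∈ Finset.Ico t rt, (pvS arr (r + 1) - pvS arr (t + 1))
      = ∑ i ∈ Finset.Icc (t + 1) (rt - 1), (((rt : Int)) - (i : Int)) * pvA arr i := by
  induction rt, h using Nat.le_induction with
  | base =>
    rw [Finset.Icc_eq_empty (by omega)]
    simp
  | succ rt hle ih =>
    obtain ⟨s, rfl⟩ : ∃ s, rt = s + 1 := ⟨rt - 1, by omega⟩
    rw [Finset.sum_Ico_succ_top (by omega : t ≤ s + 1), ih]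
    have hS : pvS arr (s + 1 + 1) - pvS arr (t + 1)
        = ∑ i ∈ Finset.Icc (t + 1) s, pvA arr i + pvA arr (s + 1) := by
      rw [pvS_diff arr (t + 1) (s + 1 + 1) (by omega),
          Finset.sum_Ico_succ_top (by omega : t + 1 ≤ s + 1), ← Finset.Ico_add_one_right_eq_Icc]
    rw [hS]
    have h1 : s + 1 - 1 = s := by omega
    have h2 : s + 1 + 1 - 1 = s + 1 := by omega
    rw [h1, h2, Finset.sum_Icc_succ_top (by omega : t + 1 ≤ s + 1)]
    rw [← add_assoc, ← Finset.sum_add_distrib]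
    have hcong : ∀ i ∈ Finset.Icc (t + 1) s,
        (((s + 1 : Nat) : Int) - (i : Int)) * pvA arr i + pvA arr i
          = (((s + 1 + 1 : Nat) : Int) - (i : Int)) * pvA arr i := by
      intro i _; push_cast; ring
    rw [Finset.sum_congr rfl hcong]
    push_cast
    ring

theorem pvW_diff (arr : List Int) (a b : Nat) (h : a ≤ b) :
    pvW arr b - pvW arr a = ∑ j ∈ Finset.Ico a b, ((j : Int) + 1) * pvA arr j := by
  rw [pvW_eq, pvW_eq, Finset.range_eq_Ico,
      ← Finset.sum_Ico_consecutive _ (Nat.zero_le a) h]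
  ring

theorem pvWrev_diff (arr : List Int) (a b : Nat) (h : a ≤ b) :
    pvWrev arr b - pvWrev arr a
      = ∑ s ∈ Finset.Ico a b, ((s : Int) + 1) * pvA arr (arr.length - 1 - s) := by
  rw [pvWrev_eq, pvWrev_eq, Finset.range_eq_Ico,
      ← Finset.sum_Ico_consecutive _ (Nat.zero_le a) h]
  ring

-- values of the `sum` lambda on the three built lists
theorem pvSubSum_P (arr : List Int) (l r : Nat) (hl : l ≤ r) (hr : r < arr.length) :
    pvSubSum (pvP arr) (l : Int) (r : Int) = pvS arr (r + 1) - pvS arr l := by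
  unfold pvP
  rw [pvSubSum_map _ _ _ _ hr hl]
  rcases Nat.eq_zero_or_pos l with rfl | hpos
  · simp [pvS]
  · rw [if_neg (by omega)]
    congr 2
    omega

theorem pvSubSum_Q (arr : List Int) (l r : Nat) (hl : l ≤ r) (hr : r < arr.length) :
    pvSubSum (pvQ arr) (l : Int) (r : Int) = pvW arr (r + 1) - pvW arr l := by
  unfold pvQ
  rw [pvSubSum_map _ _ _ _ hr hl]
  rcases Nat.eq_zero_or_pos l with rfl | hpos
  · simp [pvW]
  · rw [if_neg (by omega)]
    congr 2
    omega

theorem pvSubSum_R (arr : List Int) (l r : Nat) (hl : l ≤ r) (hr : r < arr.length) :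
    pvSubSum (pvR arr) (l : Int) (r : Int) = pvWrev arr (r + 1) - pvWrev arr l := by
  unfold pvR
  rw [pvSubSum_map _ _ _ _ hr hl]
  rcases Nat.eq_zero_or_pos l with rfl | hpos
  · simp [pvWrev]
  · rw [if_neg (by omega)]
    congr 2
    omega

-- the popped contribution is the box sum
theorem pvPc_eq (arr : List Int) (t : Nat) (ht : t < arr.length) :
    pvPcN arr t
      = pvA arr t * ∑ l ∈ Finset.Icc (pvLo arr t) t, ∑ r ∈ Finset.Ico t (pvRt arr t), pvSubN arr l r := by
  have hL1 := pvL_ge arr t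
  have hL2 := pvL_lt arr t
  have hlo : ((pvLo arr t : Nat) : Int) = pvL arr t + 1 := Int.toNat_of_nonneg (by omega)
  set n := arr.length with hn
  set lo := pvLo arr t with hlodef
  set rt := pvRt arr t with hrtdef
  have hlot : lo ≤ t := by omega
  have hrt1 : t < rt := pvRt_gt arr t
  have hrt2 : rt ≤ n := pvRt_le arr t ht
  -- left factor:  s1 = Σ_{l ∈ Icc lo t} (S (t+1) - S l)
  have hA1 : pvSubSum (pvQ arr) (pvL arr t + 1) (t : Int)
        - pvSubSum (pvP arr) (pvL arr t + 1) (t : Int) * (pvL arr t + 1)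
      = ∑ l ∈ Finset.Icc lo t, (pvS arr (t + 1) - pvS arr l) := by
    rw [← hlo, pvSubSum_Q arr lo t hlot ht, pvSubSum_P arr lo t hlot ht, pvAbel1 arr lo t hlot]
    have hW := pvW_diff arr lo (t + 1) (by omega)
    have hs := pvS_diff arr lo (t + 1) (by omega)
    rw [hW, hs, ← Finset.Ico_add_one_right_eq_Icc, Finset.sum_mul, ← Finset.sum_sub_distrib]
    exact Finset.sum_congr rfl (fun j _ => by ring)
  -- right factor: s2 = Σ_{r ∈ Ico t rt} (S (r+1) - S (t+1))
  have hB : pvSubSum (pvR arr) ((n : Int) - (rt : Int)) ((n : Int) - (t : Int) - 2)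
        - pvSubSum (pvP arr) ((t : Int) + 1) ((rt : Int) - 1) * ((n : Int) - (rt : Int))
      = ∑ r ∈ Finset.Ico t rt, (pvS arr (r + 1) - pvS arr (t + 1)) := by
    rcases Nat.eq_or_lt_of_le hrt1 with hrteq | hrtgt
    · -- rt = t + 1 : everything vanishes
      rw [← hrteq]
      rw [pvSubSum_of_gt _ _ _ (by push_cast; omega),
          pvSubSum_of_gt _ _ _ (by push_cast; omega)]
      simp
    · -- t + 2 ≤ rt
      have hc1 : ((n : Int) - (rt : Int)) = ((n - rt : Nat) : Int) := by
        push_cast [Nat.cast_sub hrt2]; ring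
      have hc2 : ((n : Int) - (t : Int) - 2) = ((n - t - 2 : Nat) : Int) := by
        push_cast [Nat.cast_sub (by omega : t + 2 ≤ n)]
        omega
      have hc3 : ((t : Int) + 1) = ((t + 1 : Nat) : Int) := by push_cast; ring
      have hc4 : ((rt : Int) - 1) = ((rt - 1 : Nat) : Int) := by
        push_cast [Nat.cast_sub (by omega : 1 ≤ rt)]; ring
      rw [hc1, hc2, hc3, hc4,
          pvSubSum_R arr (n - rt) (n - t - 2) (by omega) (by omega),
          pvSubSum_P arr (t + 1) (rt - 1) (by omega) (by omega)]
      have hrev : pvWrev arr (n - t - 2 + 1) - pvWrev arr (n - rt)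
          = ∑ i ∈ Finset.Icc (t + 1) (rt - 1), ((n : Int) - (i : Int)) * pvA arr i := by
        rw [pvWrev_diff arr (n - rt) (n - t - 2 + 1) (by omega)]
        refine Finset.sum_nbij' (fun s => n - 1 - s) (fun i => n - 1 - i) ?_ ?_ ?_ ?_ ?_
        · intro s hs
          simp only [Finset.mem_Ico] at hs
          simp only [Finset.mem_Icc]
          omega
        · intro i hi
          simp only [Finset.mem_Icc] at hi
          simp only [Finset.mem_Ico]
          omega
        · intro s hs
          simp only [Finset.mem_Ico] at hs
          simp only []
          omega
        · intro i hi
          simp only [Finset.mem_Icc] at hi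
          simp only []
          omega
        · intro s hs
          simp only [Finset.mem_Ico] at hs
          simp only []
          have h2 : ((s : Int) + 1) = (n : Int) - ((n - 1 - s : Nat) : Int) := by omega
          rw [h2]
      have hP : pvS arr (rt - 1 + 1) - pvS arr (t + 1)
          = ∑ i ∈ Finset.Icc (t + 1) (rt - 1), pvA arr i := by
        rw [pvS_diff arr (t + 1) (rt - 1 + 1) (by omega), ← Finset.Ico_add_one_right_eq_Icc]
      rw [hrev, hP, pvAbel2 arr t rt (by omega), Finset.sum_mul, ← Finset.sum_sub_distrib]
      exact Finset.sum_congr rfl (fun i _ => by rw [← hc1]; ring)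
  -- assemble
  unfold pvPcN pvPopContrib
  rw [← hn, ← hrtdef]
  simp only []
  rw [PySem.List.pyGetD_natCast]
  have hAa : arr.getD t 0 = pvA arr t := rfl
  rw [hAa, hA1, hB]
  -- expand the box double sum
  have hexp : ∑ l ∈ Finset.Icc lo t, ∑ r ∈ Finset.Ico t rt, pvSubN arr l r
      = ((rt : Int) - (t : Int)) * ∑ l ∈ Finset.Icc lo t, (pvS arr (t + 1) - pvS arr l)
        + ((t : Int) - (lo : Int) + 1) * ∑ r ∈ Finset.Ico t rt, (pvS arr (r + 1) - pvS arr (t + 1)) := by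
    have hinner : ∀ l ∈ Finset.Icc lo t,
        ∑ r ∈ Finset.Ico t rt, pvSubN arr l r
          = ∑ r ∈ Finset.Ico t rt, (pvS arr (r + 1) - pvS arr (t + 1))
            + ((rt : Int) - (t : Int)) * (pvS arr (t + 1) - pvS arr l) := by
      intro l _
      have : ∀ r ∈ Finset.Ico t rt, pvSubN arr l r
          = (pvS arr (r + 1) - pvS arr (t + 1)) + (pvS arr (t + 1) - pvS arr l) := by
        intro r _
        unfold pvSubN
        ring
      rw [Finset.sum_congr rfl this, Finset.sum_add_distrib, Finset.sum_const, Nat.card_Ico,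
          nsmul_eq_mul]
      have : ((rt - t : Nat) : Int) = (rt : Int) - (t : Int) := by
        push_cast [Nat.cast_sub (by omega : t ≤ rt)]; ring
      rw [this]
    rw [Finset.sum_congr rfl hinner, Finset.sum_add_distrib, Finset.sum_const, Nat.card_Icc,
        nsmul_eq_mul, ← Finset.mul_sum]
    have : ((t + 1 - lo : Nat) : Int) = (t : Int) - (lo : Int) + 1 := by
      push_cast [Nat.cast_sub (by omega : lo ≤ t + 1)]; ring
    rw [this]
    ring
  rw [hexp]
  have hLlo : pvL arr t = (lo : Int) - 1 := by omega
  rw [hLlo]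
  ring

-- stack loop --------------------------------------------------------------
theorem pvInner_spec (arr : List Int) (n i : Int) (ps keep : List Nat) (tot : Int)
    (h1 : ∀ t ∈ ps, PySem.List.pyGetD arr i 0 < pvA arr t)
    (h2 : ∀ t, (keep.reverse).head? = some t → pvA arr t ≤ PySem.List.pyGetD arr i 0) :
    pvInnerLoop arr (pvP arr) (pvQ arr) (pvR arr) n i
      (ps.map (pvEnc arr) ++ (keep.reverse).map (pvEnc arr)) tot
    = ((keep.reverse).map (pvEnc arr),
       tot + (ps.map (fun (t : Nat) => pvPopContrib arr (pvP arr) (pvQ arr) (pvR arr) n (t : Int) (pvL arr t) i)).sum) := by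
  induction ps generalizing tot with
  | nil =>
    simp only [List.map_nil, List.nil_append, List.sum_nil, add_zero]
    cases hrev : keep.reverse with
    | nil => simp [pvInnerLoop]
    | cons t0 rest =>
      have ht0 := h2 t0 (by rw [hrev]; rfl)
      simp only [List.map_cons, pvEnc, pvInnerLoop]
      rw [if_neg (by
        rw [PySem.List.pyGetD_natCast]
        exact not_lt.mpr ht0)]
  | cons t ps ih =>
    have hguard : PySem.List.pyGetD arr i 0 < PySem.List.pyGetD arr (t : Int) 0 := by
      rw [PySem.List.pyGetD_natCast]
      exact h1 t (List.mem_cons_self ..)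
    simp only [List.map_cons, List.cons_append, pvEnc, pvInnerLoop]
    rw [if_pos hguard]
    rw [ih (h1 := fun u hu => h1 u (List.mem_cons_of_mem _ hu))]
    simp only [List.sum_cons]
    ring_nf

theorem pvFinal_spec (arr : List Int) (n : Int) (l : List Nat) (tot : Int) :
    pvFinalLoop arr (pvP arr) (pvQ arr) (pvR arr) n (l.map (pvEnc arr)) tot
    = tot + (l.map (fun (t : Nat) => pvPopContrib arr (pvP arr) (pvQ arr) (pvR arr) n (t : Int) (pvL arr t) n)).sum := by
  induction l generalizing tot with
  | nil => simp [pvFinalLoop]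
  | cons t l ih =>
    simp only [List.map_cons, pvEnc, pvFinalLoop, List.sum_cons]
    rw [ih]
    ring_nf

theorem pvAsc_mem (arr : List Int) (i t : Nat) :
    t ∈ pvAsc arr i ↔ t < i ∧ i ≤ pvRt arr t := by
  simp [pvAsc, List.mem_filter]

theorem pvAsc_pairwise_lt (arr : List Int) (i : Nat) : (pvAsc arr i).Pairwise (· < ·) :=
  (List.pairwise_lt_range).sublist List.filter_sublist

theorem pvAsc_mono (arr : List Int) (i : Nat) :
    (pvAsc arr i).Pairwise (fun s t => pvA arr s ≤ pvA arr t) := by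
  refine List.Pairwise.imp_of_mem ?_ (pvAsc_pairwise_lt arr i)
  intro s t hs ht hlt
  rw [pvAsc_mem] at hs ht
  exact (pvRt_min arr s t hlt (by omega)).2

theorem pvSplit (l : List Nat) (f : Nat → Int) (c : Int)
    (h : l.Pairwise (fun s t => f s ≤ f t)) :
    l = l.filter (fun x => decide (f x ≤ c)) ++ l.filter (fun x => decide (c < f x)) := by
  induction l with
  | nil => rfl
  | cons x xs ih =>
    rw [List.pairwise_cons] at h
    rcases le_or_gt (f x) c with hle | hgt
    · simp only [List.filter_cons, decide_eq_true hle, if_pos]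
      rw [if_neg (by simp [not_lt.mpr hle]), List.cons_append]
      exact congrArg (x :: ·) (ih h.2)
    · have h1 : xs.filter (fun x => decide (f x ≤ c)) = [] := by
        rw [List.filter_eq_nil_iff]
        intro y hy
        simp only [decide_eq_true_eq]
        exact not_le.mpr (lt_of_lt_of_le hgt (h.1 y hy))
      have h2 : xs.filter (fun x => decide (c < f x)) = xs := by
        rw [List.filter_eq_self]
        intro y hy
        simp only [decide_eq_true_eq]
        exact lt_of_lt_of_le hgt (h.1 y hy)
      simp only [List.filter_cons, decide_eq_true hgt]
      rw [if_neg (by simp [not_le.mpr hgt]), if_pos (by simp), h1, h2, List.nil_append]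

theorem pvLast_max (l : List Nat) (h : l.Pairwise (· < ·)) (hne : l ≠ []) :
    ∀ v ∈ l, v ≤ l.getLast hne := by
  induction l with
  | nil => exact absurd rfl hne
  | cons x xs ih =>
    rw [List.pairwise_cons] at h
    intro v hv
    cases xs with
    | nil =>
      simp at hv
      simp [hv]
    | cons y ys =>
      rw [List.getLast_cons (by simp)]
      rcases List.mem_cons.mp hv with rfl | hv'
      · exact le_of_lt (lt_of_lt_of_le (h.1 y (by simp))
          ((ih h.2 (by simp)) y (by simp)))
      · exact ih h.2 (by simp) v hv'

theorem pvExists_keep (arr : List Int) (i u : Nat) (hi : i ≤ arr.length)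
    (hu : u < i) (hau : pvA arr u ≤ pvA arr i) :
    ∃ v, u ≤ v ∧ v < i ∧ i ≤ pvRt arr v ∧ pvA arr v ≤ pvA arr i := by
  classical
  set P : Nat → Prop := fun v => u ≤ v ∧ v < i ∧ pvA arr v ≤ pvA arr i with hP
  have hPu : P u := ⟨le_rfl, hu, hau⟩
  have hspec : P (Nat.findGreatest P i) :=
    Nat.findGreatest_spec (Nat.le_of_lt hu) hPu
  refine ⟨Nat.findGreatest P i, hspec.1, hspec.2.1, ?_, hspec.2.2⟩
  apply pvRt_ge_of
  intro w hw1 hw2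
  have hgr : ¬ P w := Nat.findGreatest_is_greatest hw1 (by omega)
  have haw : pvA arr i < pvA arr w := by
    by_contra hc
    exact hgr ⟨by omega, by omega, le_of_not_gt hc⟩
  refine ⟨by omega, ?_⟩
  exact not_lt.mpr (le_trans hspec.2.2 (le_of_lt haw))

theorem pvKeep_char (arr : List Int) (i : Nat) (hi : i ≤ arr.length) :
    ((pvAsc arr i).filter (fun t => decide (pvA arr t ≤ pvA arr i)) = [] → pvL arr i = -1) ∧
    (∀ hne : (pvAsc arr i).filter (fun t => decide (pvA arr t ≤ pvA arr i)) ≠ [],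
      pvL arr i = (((pvAsc arr i).filter (fun t => decide (pvA arr t ≤ pvA arr i))).getLast hne : Int)) := by
  set keep := (pvAsc arr i).filter (fun t => decide (pvA arr t ≤ pvA arr i)) with hkeep
  have hmem : ∀ t, t ∈ keep ↔ (t < i ∧ i ≤ pvRt arr t ∧ pvA arr t ≤ pvA arr i) := by
    intro t
    rw [hkeep, List.mem_filter, pvAsc_mem]
    simp [and_assoc]
  constructor
  · intro hnil
    apply pvL_eq_neg_one_of
    intro j hj
    by_contra hc
    obtain ⟨v, _, hv2, hv3, hv4⟩ := pvExists_keep arr i j hi hj (le_of_not_gt hc)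
    have : v ∈ keep := (hmem v).mpr ⟨hv2, hv3, hv4⟩
    rw [hnil] at this
    simp at this
  · intro hne
    have hkl := List.getLast_mem hne
    rw [hmem] at hkl
    apply pvL_eq_of arr i _ hkl.1 hkl.2.2
    intro j hj1 hj2
    by_contra hc
    obtain ⟨v, hv1, hv2, hv3, hv4⟩ := pvExists_keep arr i j hi hj2 (le_of_not_gt hc)
    have hvk : v ∈ keep := (hmem v).mpr ⟨hv2, hv3, hv4⟩
    have := pvLast_max keep ((pvAsc_pairwise_lt arr i).sublist List.filter_sublist) hne v hvk
    omega

theorem pvFilterOrPerm (l : List Nat) (p q r : Nat → Prop)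
    [DecidablePred p] [DecidablePred q] [DecidablePred r]
    (h : ∀ x ∈ l, p x ↔ (q x ∨ r x)) (hd : ∀ x ∈ l, ¬(q x ∧ r x)) :
    (l.filter (fun x => decide (p x))).Perm
      (l.filter (fun x => decide (q x)) ++ l.filter (fun x => decide (r x))) := by
  induction l with
  | nil => simp
  | cons x xs ih =>
    have ih' := ih (fun y hy => h y (List.mem_cons_of_mem _ hy))
      (fun y hy => hd y (List.mem_cons_of_mem _ hy))
    have hx := h x (List.mem_cons_self ..)
    have hdx := hd x (List.mem_cons_self ..)
    by_cases hq : q x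
    · have hp : p x := hx.mpr (Or.inl hq)
      have hr : ¬ r x := fun hrx => hdx ⟨hq, hrx⟩
      simp only [List.filter_cons, decide_eq_true_eq, if_pos hp, if_pos hq, if_neg hr,
        List.cons_append]
      exact ih'.cons x
    · by_cases hr : r x
      · have hp : p x := hx.mpr (Or.inr hr)
        simp only [List.filter_cons, decide_eq_true_eq, if_pos hp, if_neg hq, if_pos hr]
        exact (ih'.cons x).trans List.perm_middle.symm
      · have hp : ¬ p x := fun hpx => (hx.mp hpx).elim hq hr
        simp only [List.filter_cons, decide_eq_true_eq, if_neg hp, if_neg hq, if_neg hr]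
        exact ih'

theorem pvStep (arr : List Int) (i : Nat) (hi : i < arr.length) :
    (fun (st : List (Int × Int) × Int) (iv : Int) =>
      let st' := pvInnerLoop arr (pvP arr) (pvQ arr) (pvR arr) (arr.length : Int) iv st.1 st.2
      match st'.1 with
      | [] => ((iv, -1) :: st'.1, st'.2)
      | (m, _) :: _ => ((iv, m) :: st'.1, st'.2)) (pvStk arr i, pvTot arr i) (i : Int)
    = (pvStk arr (i + 1), pvTot arr (i + 1)) := by
  have hiN : i ≤ arr.length := le_of_lt hi
  set keep := (pvAsc arr i).filter (fun t => decide (pvA arr t ≤ pvA arr i)) with hkeep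
  set popd := (pvAsc arr i).filter (fun t => decide (pvA arr i < pvA arr t)) with hpopd
  have hsplit : pvAsc arr i = keep ++ popd := pvSplit _ (pvA arr) (pvA arr i) (pvAsc_mono arr i)
  have hstk : pvStk arr i = (popd.reverse).map (pvEnc arr) ++ (keep.reverse).map (pvEnc arr) := by
    rw [pvStk, hsplit, List.reverse_append, List.map_append]
  have hpop_mem : ∀ t ∈ popd, t < i ∧ i ≤ pvRt arr t ∧ pvA arr i < pvA arr t := by
    intro t ht
    rw [hpopd, List.mem_filter, pvAsc_mem] at ht
    simp only [decide_eq_true_eq] at ht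
    exact ⟨ht.1.1, ht.1.2, ht.2⟩
  have hkeep_mem : ∀ t ∈ keep, t < i ∧ i ≤ pvRt arr t ∧ pvA arr t ≤ pvA arr i := by
    intro t ht
    rw [hkeep, List.mem_filter, pvAsc_mem] at ht
    simp only [decide_eq_true_eq] at ht
    exact ⟨ht.1.1, ht.1.2, ht.2⟩
  have hpop_rt : ∀ t ∈ popd, pvRt arr t = i := by
    intro t ht
    obtain ⟨h1, h2, h3⟩ := hpop_mem t ht
    exact le_antisymm (pvRt_le_of arr t i h1 (Or.inr h3)) h2
  have hkeep_rt : ∀ t ∈ keep, i + 1 ≤ pvRt arr t := by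
    intro t ht
    obtain ⟨h1, h2, h3⟩ := hkeep_mem t ht
    rcases Nat.eq_or_lt_of_le h2 with heq | hlt
    · exfalso
      have hsp := pvRt_lt_spec arr t (by omega)
      rw [← heq] at hsp
      exact absurd h3 (not_le.mpr hsp)
    · omega
  have hinner := pvInner_spec arr ((arr.length : Nat) : Int) (i : Int) (popd.reverse) keep
      (pvTot arr i)
      (fun t ht => by
        rw [PySem.List.pyGetD_natCast]
        exact (hpop_mem t (List.mem_reverse.mp ht)).2.2)
      (fun t0 h0 => by
        rw [PySem.List.pyGetD_natCast]
        exact (hkeep_mem t0 (List.mem_reverse.mp (List.mem_of_mem_head? h0))).2.2)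
  have hascS : pvAsc arr (i + 1) = keep ++ [i] := by
    rw [pvAsc, List.range_succ, List.filter_append]
    congr 1
    · rw [hkeep, pvAsc, List.filter_filter]
      apply List.filter_congr
      intro t ht
      rw [List.mem_range] at ht
      rw [Bool.and_comm, ← Bool.decide_and, decide_eq_decide]
      constructor
      · intro hS
        refine ⟨by omega, ?_⟩
        by_contra hc
        have := pvRt_le_of arr t i ht (Or.inr (lt_of_not_ge hc))
        omega
      · rintro ⟨h2, h3⟩
        rcases Nat.eq_or_lt_of_le h2 with heq | hlt
        · exfalso
          have hsp := pvRt_lt_spec arr t (by omega)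
          rw [← heq] at hsp
          exact absurd h3 (not_le.mpr hsp)
        · omega
    · simp only [List.filter_cons, List.filter_nil, decide_eq_true_eq]
      rw [if_pos (by have := pvRt_gt arr i; omega)]
  have hpc : ∀ t ∈ popd,
      pvPopContrib arr (pvP arr) (pvQ arr) (pvR arr) ((arr.length : Nat) : Int) (t : Int)
        (pvL arr t) (i : Int) = pvPcN arr t := by
    intro t ht
    unfold pvPcN
    rw [hpop_rt t ht]
  have hsum : ((popd.reverse).map (fun (t : Nat) =>
        pvPopContrib arr (pvP arr) (pvQ arr) (pvR arr) ((arr.length : Nat) : Int) (t : Int)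
          (pvL arr t) (i : Int))).sum
      = (popd.map (pvPcN arr)).sum := by
    rw [List.map_congr_left (fun t ht => hpc t (List.mem_reverse.mp ht)),
        List.map_reverse, List.sum_reverse]
  have htot : pvTot arr (i + 1) = pvTot arr i + (popd.map (pvPcN arr)).sum := by
    rw [pvTot, List.range_succ, List.filter_append]
    have hsing : [i].filter (fun t => decide (pvRt arr t < i + 1)) = [] := by
      simp only [List.filter_cons, List.filter_nil, decide_eq_true_eq]
      rw [if_neg (by have := pvRt_gt arr i; omega)]
    rw [hsing, List.append_nil]
    have hperm := pvFilterOrPerm (List.range i)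
      (fun t => pvRt arr t < i + 1) (fun t => pvRt arr t < i)
      (fun t => i ≤ pvRt arr t ∧ pvA arr i < pvA arr t)
      (by
        intro t ht
        rw [List.mem_range] at ht
        constructor
        · intro hS
          rcases Nat.lt_or_ge (pvRt arr t) i with hlt | hge
          · exact Or.inl hlt
          · refine Or.inr ⟨hge, ?_⟩
            have heq : pvRt arr t = i := by omega
            have := pvRt_lt_spec arr t (by omega)
            rw [heq] at this
            exact this
        · rintro (hlt | ⟨hge, hgt⟩)
          · omega
          · have := pvRt_le_of arr t i ht (Or.inr hgt)
            omega)
      (by intro t _; omega)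
    have hpopd_eq : (List.range i).filter
          (fun t => decide (i ≤ pvRt arr t ∧ pvA arr i < pvA arr t)) = popd := by
      rw [hpopd, pvAsc, List.filter_filter]
      apply List.filter_congr
      intro t _
      rw [Bool.eq_iff_iff]
      simp only [decide_eq_true_eq, Bool.and_eq_true]
      tauto
    rw [hpopd_eq] at hperm
    rw [(hperm.map (pvPcN arr)).sum_eq, List.map_append, List.sum_append, pvTot]
  -- assemble
  simp only []
  rw [hstk]
  rw [hinner]
  rcases List.eq_nil_or_concat keep with hk | ⟨ks, kl, hkc⟩
  · rw [hk]
    simp only [List.reverse_nil, List.map_nil]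
    have hL : pvL arr i = -1 := (pvKeep_char arr i hiN).1 (by rw [← hkeep, hk])
    rw [pvStk, hascS, hk, List.nil_append, htot, hsum]
    simp [pvEnc, hL]
  · rw [List.concat_eq_append] at hkc
    have hne : keep ≠ [] := by rw [hkc]; simp
    have hL : pvL arr i = ((keep.getLast hne : Nat) : Int) := (pvKeep_char arr i hiN).2 hne
    have hkl : keep.getLast hne = kl := by
      have h1 : keep.getLast? = some kl := by rw [hkc]; simp
      have h2 := List.getLast?_eq_some_getLast hne
      rw [h1] at h2
      exact (Option.some.inj h2).symm
    rw [hkl] at hL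
    rw [hkc, List.reverse_append]
    simp only [List.reverse_cons, List.reverse_nil, List.nil_append, List.cons_append,
      List.map_cons, pvEnc]
    rw [pvStk, hascS, hkc, List.reverse_append, List.reverse_append]
    simp only [List.reverse_cons, List.reverse_nil, List.nil_append, List.cons_append,
      List.map_cons, List.map_append, pvEnc]
    rw [htot, hsum, hL]

theorem pvMainFold (arr : List Int) (m : Nat) (hm : m ≤ arr.length) :
    ((PySem.List.pyRange 0 (m : Int) 1).foldl
      (fun (st : List (Int × Int) × Int) i =>
        let st' := pvInnerLoop arr (pvP arr) (pvQ arr) (pvR arr) (arr.length : Int) i st.1 st.2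
        match st'.1 with
        | [] => ((i, -1) :: st'.1, st'.2)
        | (m, _) :: _ => ((i, m) :: st'.1, st'.2))
      ([], 0))
    = (pvStk arr m, pvTot arr m) := by
  induction m with
  | zero =>
    rw [show ((0 : Nat) : Int) = 0 by norm_num, PySem.List.pyRange_one_eq_nil le_rfl]
    simp [pvStk, pvTot, pvAsc]
  | succ m ih =>
    rw [show ((m + 1 : Nat) : Int) = (m : Int) + 1 by push_cast; ring,
        PySem.List.pyRange_one_succ_right (by positivity : (0 : Int) ≤ (m : Int)),
        List.foldl_append, ih (by omega)]
    simp only [List.foldl_cons, List.foldl_nil]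
    exact pvStep arr m (by omega)

theorem pvA_total (arr : List Int) :
    optimalScoresOfSubArrays arr = ∑ t ∈ Finset.range arr.length, pvPcN arr t := by
  unfold optimalScoresOfSubArrays
  simp only []
  rw [pvBuild1, pvBuild2]
  simp only []
  rw [pvMainFold arr arr.length le_rfl]
  simp only []
  rw [pvStk, pvFinal_spec]
  have hfin : ∀ t ∈ (pvAsc arr arr.length).reverse,
      pvPopContrib arr (pvP arr) (pvQ arr) (pvR arr) ((arr.length : Nat) : Int) (t : Int)
        (pvL arr t) ((arr.length : Nat) : Int) = pvPcN arr t := by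
    intro t ht
    rw [List.mem_reverse, pvAsc_mem] at ht
    have hrt : pvRt arr t = arr.length := le_antisymm (pvRt_le arr t ht.1) ht.2
    unfold pvPcN
    rw [hrt]
  rw [List.map_congr_left hfin, List.map_reverse, List.sum_reverse, pvTot, pvAsc]
  have hnotf : (List.range arr.length).filter (fun t => decide (arr.length ≤ pvRt arr t))
      = (List.range arr.length).filter (fun t => !decide (pvRt arr t < arr.length)) := by
    apply List.filter_congr
    intro t _
    rw [Bool.eq_iff_iff]
    simp [not_lt]
  rw [hnotf]
  have hperm := (List.filter_append_perm (fun t => decide (pvRt arr t < arr.length))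
    (List.range arr.length)).map (pvPcN arr)
  rw [← List.sum_append, ← List.map_append, hperm.sum_eq]
  rfl

-- partition ---------------------------------------------------------------
theorem pvMin_le (arr : List Int) (l r j : Nat) (h1 : l ≤ j) (h2 : j ≤ r) :
    pvMin arr l r ≤ pvA arr j := by
  unfold pvMin
  rcases Nat.eq_or_lt_of_le h1 with rfl | hlt
  · exact (PySem.List.foldl_min_le _ _).1
  · exact (PySem.List.foldl_min_le _ _).2 (pvA arr j)
      (List.mem_map_of_mem (by rw [List.mem_range'_1]; omega))
theorem pvMin_attained (arr : List Int) (l r : Nat) :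
    ∃ j, l ≤ j ∧ j ≤ max l r ∧ pvA arr j = pvMin arr l r := by
  unfold pvMin
  rcases PySem.List.foldl_min_mem (((List.range' (l + 1) (r - l)).map (pvA arr))) (pvA arr l) with h | h
  · exact ⟨l, le_rfl, le_max_left _ _, h.symm⟩
  · obtain ⟨j, hj, hval⟩ := List.mem_map.mp h
    rw [List.mem_range'_1] at hj
    exact ⟨j, by omega, by omega, hval⟩
theorem pvMin_succ (arr : List Int) (l r : Nat) (h : l ≤ r) :
    pvMin arr l (r + 1) = min (pvMin arr l r) (pvA arr (r + 1)) := by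
  unfold pvMin
  have h1 : r + 1 - l = (r - l) + 1 := by omega
  have h2 : l + 1 + (r - l) = r + 1 := by omega
  rw [h1, List.range'_1_concat, h2, List.map_append, List.map_cons, List.map_nil,
      List.foldl_append]
  simp

def pvChosen (arr : List Int) (l r : Nat) : Nat := Nat.find (pvMin_attained arr l r)

theorem pvChosen_mem (arr : List Int) (l r : Nat) (hlr : l ≤ r) :
    l ≤ pvChosen arr l r ∧ pvChosen arr l r ≤ r ∧ pvA arr (pvChosen arr l r) = pvMin arr l r := by
  obtain ⟨h1, h2, h3⟩ := Nat.find_spec (pvMin_attained arr l r)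
  exact ⟨h1, le_trans h2 (Nat.max_le.mpr ⟨hlr, le_rfl⟩), h3⟩

theorem pvChosen_first (arr : List Int) (l r j : Nat) (hlr : l ≤ r)
    (hj1 : l ≤ j) (hj2 : j < pvChosen arr l r) : pvMin arr l r < pvA arr j := by
  have hmin := Nat.find_min (pvMin_attained arr l r) hj2
  have hc := pvChosen_mem arr l r hlr
  have hjr : j ≤ r := by omega
  have hle := pvMin_le arr l r j hj1 hjr
  rcases lt_or_eq_of_le hle with h | h
  · exact h
  · exact absurd ⟨hj1, le_trans hjr (le_max_right l r), h.symm⟩ hmin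

theorem pvCond_holds (arr : List Int) (l r : Nat) (hlr : l ≤ r) (hr : r < arr.length) :
    pvLo arr (pvChosen arr l r) ≤ l ∧ l ≤ pvChosen arr l r ∧ pvChosen arr l r ≤ r ∧
      r < pvRt arr (pvChosen arr l r) := by
  obtain ⟨h1, h2, h3⟩ := pvChosen_mem arr l r hlr
  set c := pvChosen arr l r with hc
  refine ⟨?_, h1, h2, ?_⟩
  · -- pvL c < l
    have hL : pvL arr c < (l : Int) := by
      by_contra hcon
      push_neg at hcon
      have h0 : 0 ≤ pvL arr c := le_trans (by positivity) hcon
      obtain ⟨hj1, hj2⟩ := pvL_spec arr c h0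
      have hjl : l ≤ (pvL arr c).toNat := by omega
      have := pvChosen_first arr l r (pvL arr c).toNat hlr hjl (by rw [← hc]; omega)
      rw [← h3] at this
      omega
    unfold pvLo
    omega
  · by_contra hcon
    push_neg at hcon
    have hu : pvRt arr c < arr.length := by omega
    have hlt := pvRt_lt_spec arr c hu
    have hgt := pvRt_gt arr c
    have hle := pvMin_le arr l r (pvRt arr c) (by omega) (by omega)
    rw [← h3] at hle
    omega

theorem pvCond_unique (arr : List Int) (l r t t' : Nat)
    (h : pvLo arr t ≤ l ∧ l ≤ t ∧ t ≤ r ∧ r < pvRt arr t)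
    (h' : pvLo arr t' ≤ l ∧ l ≤ t' ∧ t' ≤ r ∧ r < pvRt arr t') : t = t' := by
  by_contra hne
  have key : ∀ a b : Nat,
      (pvLo arr a ≤ l ∧ l ≤ a ∧ a ≤ r ∧ r < pvRt arr a) →
      (pvLo arr b ≤ l ∧ l ≤ b ∧ b ≤ r ∧ r < pvRt arr b) → a < b → False := by
    intro a b ha hb hab
    -- a ∈ (pvL b, b) : pvA b < pvA a
    have hLb : pvL arr b < (a : Int) := by
      have := pvL_ge arr b
      have hlob : ((pvLo arr b : Nat) : Int) = pvL arr b + 1 := Int.toNat_of_nonneg (by omega)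
      have : (pvLo arr b : Int) ≤ (l : Int) := by exact_mod_cast hb.1
      omega
    have h1 : pvA arr b < pvA arr a := pvL_gt arr b a hLb hab
    -- a < b ≤ r < Rt a : pvA a ≤ pvA b
    have h2 : pvA arr a ≤ pvA arr b := (pvRt_min arr a b hab (by omega)).2
    omega
  rcases Nat.lt_or_ge t t' with hlt | hge
  · exact key t t' h h' hlt
  · exact key t' t h' h (by omega)

theorem pvPartition (arr : List Int) :
    ∑ t ∈ Finset.range arr.length, pvPcN arr t
      = ∑ l ∈ Finset.range arr.length, ∑ r ∈ Finset.Ico l arr.length, pvMin arr l r * pvSubN arr l r := by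
  set n := arr.length with hn
  have hstep1 : ∀ t ∈ Finset.range n, pvPcN arr t
      = ∑ l ∈ Finset.range n, ∑ r ∈ Finset.range n,
          if pvLo arr t ≤ l ∧ l ≤ t ∧ t ≤ r ∧ r < pvRt arr t
          then pvA arr t * pvSubN arr l r else 0 := by
    intro t ht
    rw [Finset.mem_range] at ht
    rw [pvPc_eq arr t ht, Finset.mul_sum]
    have hIcc : Finset.Icc (pvLo arr t) t = Finset.range n ∩ Finset.Icc (pvLo arr t) t := by
      rw [eq_comm, Finset.inter_eq_right]
      intro x hx
      rw [Finset.mem_Icc] at hx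
      rw [Finset.mem_range]
      omega
    rw [hIcc, ← Finset.sum_ite_mem]
    apply Finset.sum_congr rfl
    intro l _
    by_cases hP : l ∈ Finset.Icc (pvLo arr t) t
    · rw [if_pos hP, Finset.mul_sum]
      rw [Finset.mem_Icc] at hP
      have hIco : Finset.Ico t (pvRt arr t) = Finset.range n ∩ Finset.Ico t (pvRt arr t) := by
        rw [eq_comm, Finset.inter_eq_right]
        intro x hx
        rw [Finset.mem_Ico] at hx
        rw [Finset.mem_range]
        have := pvRt_le arr t ht
        omega
      rw [hIco, ← Finset.sum_ite_mem]
      apply Finset.sum_congr rfl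
      intro r _
      simp only [Finset.mem_Ico]
      apply if_congr _ rfl rfl
      constructor
      · rintro ⟨h1, h2⟩
        exact ⟨hP.1, hP.2, h1, h2⟩
      · rintro ⟨_, _, h3, h4⟩
        exact ⟨h3, h4⟩
    · rw [if_neg hP]
      apply (Finset.sum_eq_zero _).symm
      intro r _
      rw [Finset.mem_Icc] at hP
      rw [if_neg (by tauto)]
  rw [Finset.sum_congr rfl hstep1]
  rw [Finset.sum_comm]
  have hswap : ∀ l ∈ Finset.range n,
      (∑ t ∈ Finset.range n, ∑ r ∈ Finset.range n,
        if pvLo arr t ≤ l ∧ l ≤ t ∧ t ≤ r ∧ r < pvRt arr t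
        then pvA arr t * pvSubN arr l r else 0)
      = ∑ r ∈ Finset.range n, ∑ t ∈ Finset.range n,
          if pvLo arr t ≤ l ∧ l ≤ t ∧ t ≤ r ∧ r < pvRt arr t
          then pvA arr t * pvSubN arr l r else 0 := by
    intro l _
    exact Finset.sum_comm
  rw [Finset.sum_congr rfl hswap]
  apply Finset.sum_congr rfl
  intro l hl
  rw [Finset.mem_range] at hl
  have hinner : ∀ r ∈ Finset.range n,
      (∑ t ∈ Finset.range n,
        if pvLo arr t ≤ l ∧ l ≤ t ∧ t ≤ r ∧ r < pvRt arr t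
        then pvA arr t * pvSubN arr l r else 0)
      = if l ≤ r then pvMin arr l r * pvSubN arr l r else 0 := by
    intro r hr
    rw [Finset.mem_range] at hr
    by_cases hlr : l ≤ r
    · rw [if_pos hlr]
      obtain ⟨hc1, hc2, hc3, hc4⟩ := pvCond_holds arr l r hlr hr
      have hcv := (pvChosen_mem arr l r hlr).2.2
      rw [Finset.sum_eq_single_of_mem (pvChosen arr l r)
        (by rw [Finset.mem_range]; omega)
        (by
          intro b _ hbne
          rw [if_neg]
          intro hb
          exact hbne (pvCond_unique arr l r b (pvChosen arr l r) hb ⟨hc1, hc2, hc3, hc4⟩))]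
      rw [if_pos ⟨hc1, hc2, hc3, hc4⟩, hcv]
    · rw [if_neg hlr]
      apply Finset.sum_eq_zero
      intro t _
      rw [if_neg (by rintro ⟨_, h2, h3, _⟩; omega)]
  rw [Finset.sum_congr rfl hinner]
  have hIco : Finset.Ico l n = Finset.range n ∩ Finset.Ico l n := by
    rw [eq_comm, Finset.inter_eq_right]
    intro x hx
    rw [Finset.mem_Ico] at hx
    rw [Finset.mem_range]
    omega
  rw [hIco, ← Finset.sum_ite_mem]
  apply Finset.sum_congr rfl
  intro r hr
  rw [Finset.mem_range] at hr
  simp only [Finset.mem_Ico]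
  apply if_congr _ rfl rfl
  constructor
  · intro h1
    exact ⟨h1, hr⟩
  · rintro ⟨h1, _⟩
    exact h1

-- B side ------------------------------------------------------------------
theorem pvAltInner (arr : List Int) (l : Nat) (tot : Int) : ∀ m : Nat,
    ((PySem.List.pyRange (l : Int) ((l + m : Nat) : Int) 1).foldl
      (fun (st : Int × Int × Int) r =>
        let s := st.1 + PySem.List.pyGetD arr r 0
        let mn := min st.2.1 (PySem.List.pyGetD arr r 0)
        (s, mn, st.2.2 + mn * s))
      (0, PySem.List.pyGetD arr (l : Int) 0, tot))
    = (pvS arr (l + m) - pvS arr l, pvMin arr l (l + m - 1),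
       tot + ∑ r ∈ Finset.Ico l (l + m), pvMin arr l r * pvSubN arr l r) := by
  intro m
  induction m with
  | zero =>
    rw [Nat.add_zero, PySem.List.pyRange_one_eq_nil le_rfl]
    have h1 : pvMin arr l (l - 1) = pvA arr l := by
      unfold pvMin
      rw [Nat.sub_eq_zero_of_le (by omega : l - 1 ≤ l)]
      rfl
    simp [h1, pvA]
  | succ m ih =>
    rw [show ((l + (m + 1) : Nat) : Int) = ((l + m : Nat) : Int) + 1 by push_cast; ring,
        PySem.List.pyRange_one_succ_right (by exact_mod_cast Nat.le_add_right l m),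
        List.foldl_append, ih]
    simp only [List.foldl_cons, List.foldl_nil, PySem.List.pyGetD_natCast]
    have hs : pvS arr (l + m) - pvS arr l + arr.getD (l + m) 0
        = pvS arr (l + m + 1) - pvS arr l := by
      rw [pvS_succ]
      show pvS arr (l + m) - pvS arr l + pvA arr (l + m) = _
      ring
    have hmn : min (pvMin arr l (l + m - 1)) (arr.getD (l + m) 0) = pvMin arr l (l + m) := by
      show min (pvMin arr l (l + m - 1)) (pvA arr (l + m)) = pvMin arr l (l + m)
      rcases Nat.eq_zero_or_pos m with rfl | hm
      · have h1 : pvMin arr l (l + 0 - 1) = pvA arr l := by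
          unfold pvMin
          rw [Nat.sub_eq_zero_of_le (by omega : l + 0 - 1 ≤ l)]
          rfl
        have h2 : pvMin arr l (l + 0) = pvA arr l := by
          unfold pvMin
          rw [Nat.sub_eq_zero_of_le (by omega : l + 0 ≤ l)]
          rfl
        rw [h1, h2, Nat.add_zero, min_self]
      · have h1 : l + m - 1 + 1 = l + m := by omega
        have h2 := pvMin_succ arr l (l + m - 1) (by omega)
        rw [h1] at h2
        exact h2.symm
    rw [hs, hmn]
    have ht : tot + ∑ r ∈ Finset.Ico l (l + m), pvMin arr l r * pvSubN arr l r
          + pvMin arr l (l + m) * (pvS arr (l + m + 1) - pvS arr l)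
        = tot + ∑ r ∈ Finset.Ico l (l + (m + 1)), pvMin arr l r * pvSubN arr l r := by
      rw [show l + (m + 1) = (l + m) + 1 by omega,
          Finset.sum_Ico_succ_top (by omega : l ≤ l + m)]
      unfold pvSubN
      ring
    rw [ht]
    have hidx : l + (m + 1) - 1 = l + m := by omega
    rw [hidx, show l + (m + 1) = l + m + 1 from rfl]

theorem pvAlt_eq (arr : List Int) :
    optimalScoresOfSubArrays_alt arr
      = ∑ l ∈ Finset.range arr.length, ∑ r ∈ Finset.Ico l arr.length, pvMin arr l r * pvSubN arr l r := by
  unfold optimalScoresOfSubArrays_alt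
  simp only []
  suffices h : ∀ k : Nat, k ≤ arr.length → ∀ tot : Int,
      ((PySem.List.pyRange 0 (k : Int) 1).foldl
        (fun total l =>
          ((PySem.List.pyRange l (arr.length : Int) 1).foldl
            (fun (st : Int × Int × Int) r =>
              let s := st.1 + PySem.List.pyGetD arr r 0
              let mn := min st.2.1 (PySem.List.pyGetD arr r 0)
              (s, mn, st.2.2 + mn * s))
            (0, PySem.List.pyGetD arr l 0, total)).2.2)
        tot)
      = tot + ∑ l ∈ Finset.range k, ∑ r ∈ Finset.Ico l arr.length, pvMin arr l r * pvSubN arr l r by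
    rw [h arr.length le_rfl 0, zero_add]
  intro k
  induction k with
  | zero =>
    intro _ tot
    rw [show ((0 : Nat) : Int) = 0 by norm_num, PySem.List.pyRange_one_eq_nil le_rfl]
    simp
  | succ k ih =>
    intro hk tot
    rw [show ((k + 1 : Nat) : Int) = (k : Int) + 1 by push_cast; ring,
        PySem.List.pyRange_one_succ_right (by positivity : (0 : Int) ≤ (k : Int)),
        List.foldl_append, ih (by omega)]
    simp only [List.foldl_cons, List.foldl_nil]
    have hcast : ((arr.length : Nat) : Int) = ((k + (arr.length - k) : Nat) : Int) := by
      congr 1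
      omega
    rw [hcast, pvAltInner arr k _ (arr.length - k)]
    simp only []
    rw [show k + (arr.length - k) = arr.length by omega, Finset.sum_range_succ]
    ring

-- ===== VERDICT =====
theorem optimalScoresOfSubArrays_spec : Claim_equal_optimalScoresOfSubArrays := by
  intro arr _
  unfold Spec_optimalScoresOfSubArrays
  rw [pvA_total, pvPartition, pvAlt_eq]
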